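-- pv_equiv track=rewrite | github.com/afstarosta/aoc2023 | 12.1/springs.py | is_valid_resolution
-- ===== SOURCE A (Python) =====
-- def is_valid_resolution(line, values):
--     clusters = line.split('.')
--     clusters = list(filter(('').__ne__, clusters))
--     if len(clusters) != len(values):
--         return False
--     for i, v in enumerate(values):
--         if len(clusters[i]) != v:
--             return False
--     return True
-- ===== SOURCE B (Python) =====
-- def is_valid_resolution(line, values):
--     vals = iter(values)
--     run = 0
--     for ch in line:
--         if ch == '.':
--             if run:
--                 if next(vals, None) != run:
--                     return False
--                 run = 0
--         else:
--             run += 1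
--     if run:
--         if next(vals, None) != run:
--             return False
--     return next(vals, None) is None
-- ===== Notes on version B (the rewrite author's own statement) =====
-- stated objective: simpler
-- what changed: B replaces A's split('.')-then-filter-then-index pipeline by a single character scan that tracks the current run length and consumes the expected values in order, with no intermediate lists.
import Mathlib
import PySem

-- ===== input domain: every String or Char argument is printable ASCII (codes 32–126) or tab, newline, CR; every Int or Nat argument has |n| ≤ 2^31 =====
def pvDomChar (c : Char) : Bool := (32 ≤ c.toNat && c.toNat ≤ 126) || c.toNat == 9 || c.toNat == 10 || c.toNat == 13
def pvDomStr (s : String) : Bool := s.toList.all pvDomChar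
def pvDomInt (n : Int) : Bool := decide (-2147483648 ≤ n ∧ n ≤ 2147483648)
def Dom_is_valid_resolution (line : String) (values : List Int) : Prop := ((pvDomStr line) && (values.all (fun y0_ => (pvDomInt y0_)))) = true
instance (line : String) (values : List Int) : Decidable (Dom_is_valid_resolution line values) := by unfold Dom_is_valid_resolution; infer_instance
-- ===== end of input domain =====

-- B replaces A's split/filter/index pipeline by a single character scan that
-- counts the current run and consumes the expected values in order (objective: simpler, one pass, no intermediate lists).

-- ===== PORT A =====
-- for i, v in enumerate(values): if len(clusters[i]) != v: return False
def aLoop (clusters : List String) : List (Int × Int) → Bool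
  | [] => true
  | (i, v) :: rest =>
      if PySem.Str.len (PySem.List.pyGetD clusters i "") ≠ v then false
      else aLoop clusters rest

def is_valid_resolution (line : String) (values : List Int) : Bool :=
  let clusters := (PySem.Str.split? line ".").getD []   -- sep "." is nonempty, so split? is always `some`
  let clusters := clusters.filter (fun c => c ≠ "")
  if clusters.length ≠ values.length then false
  else aLoop clusters (PySem.List.enumerate values)

-- ===== PORT B =====
-- the for-ch loop of Source B: run = current cluster length, vs = values not yet consumed;
-- the [] case is Source B's code after the loop (trailing run + iterator-exhausted check)
def bScan : List Char → Int → List Int → Bool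
  | [], run, vs =>
      if run ≠ 0 then
        match vs with
        | [] => false
        | v :: rest => if v ≠ run then false else rest.isEmpty
      else vs.isEmpty
  | c :: cs, run, vs =>
      if c = '.' then
        if run ≠ 0 then
          match vs with
          | [] => false
          | v :: rest => if v ≠ run then false else bScan cs 0 rest
        else bScan cs 0 vs
      else bScan cs (run + 1) vs

def is_valid_resolution_alt (line : String) (values : List Int) : Bool :=
  bScan line.toList 0 values

-- ===== PRECONDITION & SPEC =====
def Spec_is_valid_resolution (line : String) (values : List Int) (out : Bool) : Prop := out = is_valid_resolution_alt line values
instance (line : String) (values : List Int) (out : Bool) : Decidable (Spec_is_valid_resolution line values out) := by unfold Spec_is_valid_resolution; infer_instance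

-- ===== CLAIM (what is proved, stated in full; the proofs are below) =====
def Claim_equal_is_valid_resolution : Prop := ∀ (line : String) (values : List Int), Dom_is_valid_resolution line values → Spec_is_valid_resolution line values (is_valid_resolution line values)

-- ===== LEMMAS AND PROOFS =====

-- the cluster lengths (Python run lengths) of cs, with a pending run of length `run`
def runsSpec : List Char → Int → List Int
  | [], run => if run ≠ 0 then [run] else []
  | c :: cs, run => if c = '.' then (if run ≠ 0 then run :: runsSpec cs 0 else runsSpec cs 0) else runsSpec cs (run + 1)

-- structural version of Chars.splitOn for the single-char separator '.'
def mySplit : List Char → List Char → List (List Char)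
  | [], cur => [cur.reverse]
  | c :: cs, cur => if c = '.' then cur.reverse :: mySplit cs [] else mySplit cs (c :: cur)

theorem go_eq_mySplit : ∀ (fuel : Nat) (l cur : List Char) (acc : List (List Char)), l.length < fuel →
    PySem.Chars.splitOn.go ['.'] fuel l cur acc = acc.reverse ++ mySplit l cur := by
  intro fuel
  induction fuel with
  | zero => intro l cur acc h; omega
  | succ n ih =>
    intro l cur acc h
    cases l with
    | nil => simp [PySem.Chars.splitOn.go, mySplit]
    | cons c rest =>
      rw [PySem.Chars.splitOn.go]
      by_cases hc : c = '.'
      · subst hc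
        have hp : List.isPrefixOf ['.'] ('.' :: rest) = true := by
          simp [List.isPrefixOf]
        rw [hp]
        simp only [if_pos]
        rw [List.length_singleton, List.drop_one, List.tail_cons]
        rw [ih rest [] (cur.reverse :: acc) (by simpa using Nat.lt_of_succ_lt_succ h)]
        simp [mySplit]
      · have hp : List.isPrefixOf ['.'] (c :: rest) = false := by
          simp [List.isPrefixOf]; exact fun h' => (hc h'.symm).elim
        rw [hp]
        simp only [Bool.false_eq_true, if_false]
        rw [ih rest (c :: cur) acc (by simpa using Nat.lt_of_succ_lt_succ h)]
        simp [mySplit, hc]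

theorem splitOn_eq_mySplit (cs : List Char) :
    PySem.Chars.splitOn cs ['.'] = mySplit cs [] := by
  show PySem.Chars.splitOn.go ['.'] (cs.length + 1) cs [] [] = mySplit cs []
  rw [go_eq_mySplit (cs.length + 1) cs [] [] (by omega)]
  rfl

theorem mySplit_lengths : ∀ (cs cur : List Char),
    ((mySplit cs cur).filter (fun c => c ≠ [])).map (fun c => (c.length : Int))
      = runsSpec cs (cur.length : Int) := by
  intro cs
  induction cs with
  | nil =>
    intro cur
    by_cases h : cur = [] <;> simp [mySplit, runsSpec, h]
  | cons c rest ih =>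
    intro cur
    by_cases hc : c = '.'
    · subst hc
      rw [show mySplit ('.' :: rest) cur = cur.reverse :: mySplit rest [] from by simp [mySplit]]
      rw [show runsSpec ('.' :: rest) (cur.length : Int)
            = (if (cur.length : Int) ≠ 0 then (cur.length : Int) :: runsSpec rest 0 else runsSpec rest 0)
          from by simp [runsSpec]]
      by_cases h : cur = []
      · subst h
        rw [if_neg (by simp)]
        simp only [List.filter_cons]
        rw [if_neg (by simp)]
        simpa using ih []
      · rw [if_pos (by simp [h])]
        simp only [List.filter_cons]
        rw [if_pos (by simp [h])]
        rw [List.map_cons, List.length_reverse]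
        have h0 := ih []
        simp only [List.length_nil, Nat.cast_zero] at h0
        rw [h0]
    · rw [show mySplit (c :: rest) cur = mySplit rest (c :: cur) from by simp [mySplit, hc]]
      rw [show runsSpec (c :: rest) (cur.length : Int) = runsSpec rest ((cur.length : Int) + 1)
          from by simp [runsSpec, hc]]
      have h1 := ih (c :: cur)
      simpa using h1

theorem bScan_eq_runsSpec : ∀ (cs : List Char) (run : Int) (vs : List Int),
    bScan cs run vs = decide (vs = runsSpec cs run) := by
  intro cs
  induction cs with
  | nil =>
    intro run vs
    by_cases h : run = 0
    · subst h
      cases vs <;> simp [bScan, runsSpec]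
    · cases vs with
      | nil => simp [bScan, runsSpec, h]
      | cons v rest =>
        by_cases hv : v = run
        · subst hv; cases rest <;> simp [bScan, runsSpec, h]
        · simp [bScan, runsSpec, h, hv]
  | cons c rest ih =>
    intro run vs
    by_cases hc : c = '.'
    · subst hc
      by_cases h : run = 0
      · subst h; simp [bScan, runsSpec, ih]
      · cases vs with
        | nil => simp [bScan, runsSpec, h]
        | cons v tl =>
          by_cases hv : v = run
          · subst hv; simp [bScan, runsSpec, h, ih]
          · simp [bScan, runsSpec, h, hv]
    · simp [bScan, runsSpec, hc, ih]

theorem aLoop_eq : ∀ (vs : List Int) (ls pre : List String),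
    vs.length = ls.length →
    aLoop (pre ++ ls) (PySem.List.enumerate vs (pre.length : Int))
      = decide (vs = ls.map (fun c => PySem.Str.len c)) := by
  intro vs
  induction vs with
  | nil =>
    intro ls pre h
    cases ls with
    | nil => simp [aLoop, PySem.List.enumerate_nil]
    | cons l ls' => simp at h
  | cons v vs' ih =>
    intro ls pre h
    cases ls with
    | nil => simp at h
    | cons l ls' =>
      rw [PySem.List.enumerate_cons]
      have hget : PySem.List.pyGetD (pre ++ l :: ls') (pre.length : Int) "" = l := by
        rw [PySem.List.pyGetD_natCast]
        simp [List.getD]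
      rw [aLoop, hget]
      by_cases hv : PySem.Str.len l ≠ v
      · rw [if_pos hv]
        symm
        rw [decide_eq_false_iff_not]
        intro he
        rw [List.map_cons] at he
        injection he with h1 h2
        exact hv h1.symm
      · rw [Decidable.not_not] at hv
        rw [if_neg (fun hne => hne hv)]
        have hcast : (pre.length : Int) + 1 = ((pre ++ [l]).length : Int) := by simp
        rw [hcast]
        have h3 := ih ls' (pre ++ [l]) (by simpa using h)
        rw [List.append_assoc, List.singleton_append] at h3
        rw [h3, List.map_cons, hv]
        simp

theorem A_main (F : List String) (values : List Int) :
    (if F.length ≠ values.length then false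
     else aLoop F (PySem.List.enumerate values))
      = decide (values = F.map (fun c => PySem.Str.len c)) := by
  by_cases h : F.length = values.length
  · rw [if_neg (by simp [h])]
    have h1 := aLoop_eq values F [] h.symm
    simpa using h1
  · rw [if_pos h]
    symm
    rw [decide_eq_false_iff_not]
    intro he
    apply h
    rw [he, List.length_map]

theorem strFilterLen (S : List String) :
    ((S.map String.toList).filter (fun c => c ≠ [])).map (fun c => (c.length : Int))
      = (S.filter (fun c => c ≠ "")).map (fun c => PySem.Str.len c) := by
  induction S with
  | nil => simp
  | cons s tl ih =>
    simp only [List.map_cons, List.filter_cons]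
    by_cases h : s = ""
    · subst h
      rw [if_neg (by simp), if_neg (by simp)]
      exact ih
    · have hs : s.toList ≠ [] := by simpa using h
      rw [if_pos (by simpa using hs), if_pos (by simpa using h)]
      rw [List.map_cons, List.map_cons, ih, PySem.Str.len_eq]

theorem A_eq (line : String) (values : List Int) :
    is_valid_resolution line values = decide (values = runsSpec line.toList 0) := by
  unfold is_valid_resolution
  have hsplit := PySem.Str.split?_map line "."
  rw [show (".".toList) = ['.'] from by decide] at hsplit
  rw [PySem.Chars.split?] at hsplit
  cases hS : PySem.Str.split? line "." with
  | none => rw [hS] at hsplit; simp at hsplit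
  | some S =>
    rw [hS] at hsplit
    simp only [Option.map_some, List.isEmpty_cons, Bool.false_eq_true, if_false,
      Option.some.injEq] at hsplit
    simp only [Option.getD_some]
    rw [A_main]
    have key : (S.filter (fun c => c ≠ "")).map (fun c => PySem.Str.len c)
        = runsSpec line.toList 0 := by
      rw [← strFilterLen, hsplit, splitOn_eq_mySplit]
      have h2 := mySplit_lengths line.toList []
      simpa using h2
    rw [key]

-- ===== VERDICT (by name: the statement is the Claim_ definition above) =====
theorem is_valid_resolution_spec : Claim_equal_is_valid_resolution := by
  intro line values _
  unfold Spec_is_valid_resolution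
  rw [A_eq, is_valid_resolution_alt, bScan_eq_runsSpec]
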